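-- pv_equiv track=rewrite | github.com/guohao/aoc | 2015/3.py | solve
-- ===== SOURCE A (Python) =====
-- def solve(data, n):
--     x, y = [0] * n, [0] * n
--     ans = {(0, 0)}
--     t = 0
--     for c in data:
--         match c:
--             case '<':
--                 x[t] -= 1
--             case '>':
--                 x[t] += 1
--             case 'v':
--                 y[t] += 1
--             case '^':
--                 y[t] -= 1
--         ans.add((x[t], y[t]))
--         t = (t + 1) % n
--     return len(ans)
-- ===== SOURCE B (Python) =====
-- def solve(data, n):
--     ans = {(0, 0)}
--     for i in range(n):
--         x, y = 0, 0
--         for c in data[i::n]: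
--             if c == '<':
--                 x -= 1
--             elif c == '>':
--                 x += 1
--             elif c == 'v':
--                 y += 1
--             elif c == '^':
--                 y -= 1
--             ans.add((x, y))
--     return len(ans)
-- ===== Notes on version B (the rewrite author's own statement) =====
-- stated objective: alternative
-- what changed: Replaces A's single interleaved pass with parallel x[]/y[] position arrays and a cycling turn index t=(t+1)%n by n independent passes, one per santa, each walking the stride-partitioned slice data[i::n] with a single (x,y) cursor from (0,0) and adding visited points to one shared set.
import Mathlib
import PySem

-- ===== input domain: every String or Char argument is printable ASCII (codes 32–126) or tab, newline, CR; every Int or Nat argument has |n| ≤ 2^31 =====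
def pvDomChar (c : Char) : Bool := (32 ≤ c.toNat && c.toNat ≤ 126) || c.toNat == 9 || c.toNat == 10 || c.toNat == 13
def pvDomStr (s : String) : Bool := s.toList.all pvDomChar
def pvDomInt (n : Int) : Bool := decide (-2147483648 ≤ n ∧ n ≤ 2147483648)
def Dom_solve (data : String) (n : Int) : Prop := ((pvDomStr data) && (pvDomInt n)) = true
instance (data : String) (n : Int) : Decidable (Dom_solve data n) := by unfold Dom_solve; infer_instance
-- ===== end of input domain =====

-- B replaces A's interleaved pass (parallel x[]/y[] arrays, cycling turn index) by n
-- independent stride-partitioned passes data[i::n], each with a single (x,y) cursor;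
-- objective: alternative decomposition, same asymptotic cost.


-- ===== PORT A =====
-- one step of A's loop body: match on c updating x[t]/y[t], add (x[t], y[t]), t = (t+1) % n
def solveStep (n : Int) (st : List Int × List Int × PySem.Set (Int × Int) × Int) (c : Char) :
    List Int × List Int × PySem.Set (Int × Int) × Int :=
  let x := st.1
  let y := st.2.1
  let ans := st.2.2.1
  let t := st.2.2.2
  let x := if c = '<' then PySem.List.pySetD x t (PySem.List.pyGetD x t 0 - 1)
           else if c = '>' then PySem.List.pySetD x t (PySem.List.pyGetD x t 0 + 1) else x
  let y := if c = 'v' then PySem.List.pySetD y t (PySem.List.pyGetD y t 0 + 1)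
           else if c = '^' then PySem.List.pySetD y t (PySem.List.pyGetD y t 0 - 1) else y
  let ans := PySem.Set.add ans (PySem.List.pyGetD x t 0, PySem.List.pyGetD y t 0)
  (x, y, ans, PySem.Int.mod (t + 1) n)

def solve (data : String) (n : Int) : Int :=
  let st := data.toList.foldl (solveStep n)
      (List.replicate n.toNat 0, List.replicate n.toNat 0,
       PySem.Set.ofList [((0 : Int), (0 : Int))], 0)
  PySem.Set.len st.2.2.1

-- ===== PORT B =====
-- one step of B's inner loop: if/elif chain moving the single (x, y) cursor, add the new point
def solveAltStep (st : Int × Int × PySem.Set (Int × Int)) (c : Char) :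
    Int × Int × PySem.Set (Int × Int) :=
  let p : Int × Int :=
    if c = '<' then (st.1 - 1, st.2.1)
    else if c = '>' then (st.1 + 1, st.2.1)
    else if c = 'v' then (st.1, st.2.1 + 1)
    else if c = '^' then (st.1, st.2.1 - 1)
    else (st.1, st.2.1)
  (p.1, p.2, PySem.Set.add st.2.2 p)

def solve_alt (data : String) (n : Int) : Int :=
  let ans := (PySem.List.pyRange 0 n 1).foldl
    (fun ans i =>
      let cs := (PySem.List.slice? data.toList (some i) none n).getD []   -- data[i::n]
      (cs.foldl solveAltStep (0, 0, ans)).2.2)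
    (PySem.Set.ofList [((0 : Int), (0 : Int))])
  PySem.Set.len ans

-- ===== PRECONDITION & SPEC =====
-- A raises (IndexError on the empty x/y arrays) when n ≤ 0 and data is nonempty; those inputs
-- are excluded.  Everywhere A returns (n ≥ 1, or data empty) is inside Pre_.
def Pre_solve (data : String) (n : Int) : Prop := 1 ≤ n ∨ data = ""
instance (data : String) (n : Int) : Decidable (Pre_solve data n) := by
  unfold Pre_solve; infer_instance

def pvWitness_solve : String × Int := ("^>v<<v", 2)

def Spec_solve (data : String) (n : Int) (out : Int) : Prop := out = solve_alt data n
instance (data : String) (n : Int) (out : Int) : Decidable (Spec_solve data n out) := by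
  unfold Spec_solve; infer_instance

-- ===== CLAIM (what is proved, stated in full; the proofs are below) =====
def Claim_equal_solve : Prop :=
  ∀ (data : String) (n : Int), Dom_solve data n → Pre_solve data n →
    Spec_solve data n (solve data n)

-- ===== LEMMAS AND PROOFS =====

-- the displacement of one move character, shared shape of both programs' updates
def pvMove (p : Int × Int) (c : Char) : Int × Int :=
  if c = '<' then (p.1 - 1, p.2)
  else if c = '>' then (p.1 + 1, p.2)
  else if c = 'v' then (p.1, p.2 + 1)
  else if c = '^' then (p.1, p.2 - 1)
  else p

-- the trace of points visited walking cs from p (one point per character)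
def pvWalk (p : Int × Int) : List Char → List (Int × Int)
  | [] => []
  | c :: cs => pvMove p c :: pvWalk (pvMove p c) cs

-- every k-th element of cs starting with its head (indices ≡ 0 mod k)
def pvStride (cs : List Char) (k : Nat) : List Char :=
  match cs with
  | [] => []
  | c :: rest => c :: pvStride (rest.drop (k - 1)) k
termination_by cs.length
decreasing_by simp

-- number of steps until santa i's turn when it is currently santa t's turn (i, t < k)
def pvResid (i t k : Nat) : Nat := if t ≤ i then i - t else i + k - t

-- abstract form of A's loop: the list of points added, in order
def pvRunA (k : Nat) : List Int → List Int → Nat → List Char → List (Int × Int)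
  | _, _, _, [] => []
  | x, y, t, c :: cs =>
    let x' := if c = '<' then x.set t (x.getD t 0 - 1)
              else if c = '>' then x.set t (x.getD t 0 + 1) else x
    let y' := if c = 'v' then y.set t (y.getD t 0 + 1)
              else if c = '^' then y.set t (y.getD t 0 - 1) else y
    (x'.getD t 0, y'.getD t 0) :: pvRunA k x' y' ((t + 1) % k) cs

-- getD through set at another index
theorem pv_getD_set_ne (l : List Int) (i j : Nat) (v : Int) (h : j ≠ i) :
    (l.set i v).getD j 0 = l.getD j 0 := by
  rw [List.getD_eq_getElem?_getD, List.getD_eq_getElem?_getD, List.getElem?_set,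
    if_neg (fun he => h he.symm)]

-- residue bookkeeping for one loop step
theorem pv_resid_self (t k : Nat) : pvResid t t k = 0 := by simp [pvResid]

theorem pv_resid_self_next (t k : Nat) (ht : t < k) :
    pvResid t ((t + 1) % k) k = k - 1 := by
  rcases Nat.lt_or_ge (t + 1) k with h | h
  · rw [Nat.mod_eq_of_lt h]; unfold pvResid; split_ifs <;> omega
  · have hk : t + 1 = k := by omega
    rw [hk, Nat.mod_self]; unfold pvResid; split_ifs <;> omega

theorem pv_resid_ne (i t k : Nat) (hik : i < k) (ht : t < k) (hne : i ≠ t) :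
    1 ≤ pvResid i t k ∧ pvResid i ((t + 1) % k) k = pvResid i t k - 1 := by
  rcases Nat.lt_or_ge (t + 1) k with h | h
  · rw [Nat.mod_eq_of_lt h]; unfold pvResid; split_ifs <;> omega
  · have hk : t + 1 = k := by omega
    rw [hk, Nat.mod_self]; unfold pvResid; split_ifs <;> omega

-- A's fold only ever extends the answer set with the points of pvRunA
theorem pv_bridgeA (cs : List Char) (x y : List Int) (ans : PySem.Set (Int × Int))
    (t k : Nat) (hk : 0 < k) (ht : t < k) :
    (cs.foldl (solveStep (k : Int)) (x, y, ans, (t : Int))).2.2.1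
      = (pvRunA k x y t cs).foldl PySem.Set.add ans := by
  induction cs generalizing x y ans t with
  | nil => simp [pvRunA]
  | cons c cs ih =>
    have hmod : PySem.Int.mod ((t : Int) + 1) (k : Int) = ((((t + 1) % k : Nat)) : Int) := by
      push_cast
      exact_mod_cast PySem.Int.mod_natCast (t + 1) k
    simp only [List.foldl_cons, solveStep, PySem.List.pySetD_natCast,
      PySem.List.pyGetD_natCast, hmod, pvRunA]
    exact ih _ _ _ _ (Nat.mod_lt _ hk)

-- membership in A's trace = membership in some santa's stride walk
theorem pv_mem_runA (cs : List Char) (k : Nat) (x y : List Int) (t : Nat)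
    (hk : 0 < k) (ht : t < k) (hx : x.length = k) (hy : y.length = k)
    (q : Int × Int) :
    q ∈ pvRunA k x y t cs ↔
      ∃ i, i < k ∧ q ∈ pvWalk (x.getD i 0, y.getD i 0)
        (pvStride (cs.drop (pvResid i t k)) k) := by
  induction cs generalizing x y t with
  | nil =>
    simp only [pvRunA, List.not_mem_nil, false_iff, not_exists, not_and]
    intro i _
    simp [pvStride, pvWalk]
  | cons c cs ih =>
    -- the updated arrays and the point added this step
    have hkx : t < x.length := hx ▸ ht
    have hky : t < y.length := hy ▸ ht
    set x' := (if c = '<' then x.set t (x.getD t 0 - 1)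
               else if c = '>' then x.set t (x.getD t 0 + 1) else x) with hx'def
    set y' := (if c = 'v' then y.set t (y.getD t 0 + 1)
               else if c = '^' then y.set t (y.getD t 0 - 1) else y) with hy'def
    have hx'len : x'.length = k := by rw [hx'def]; split_ifs <;> simp [hx]
    have hy'len : y'.length = k := by rw [hy'def]; split_ifs <;> simp [hy]
    have hq0 : (x'.getD t 0, y'.getD t 0) = pvMove (x.getD t 0, y.getD t 0) c := by
      rw [hx'def, hy'def]; unfold pvMove
      split_ifs <;> simp_all
    have hgne : ∀ i, i ≠ t → x'.getD i 0 = x.getD i 0 ∧ y'.getD i 0 = y.getD i 0 := by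
      intro i hne
      constructor
      · rw [hx'def]; split_ifs <;> first | rw [pv_getD_set_ne _ _ _ _ hne] | rfl
      · rw [hy'def]; split_ifs <;> first | rw [pv_getD_set_ne _ _ _ _ hne] | rfl
    have hrun : pvRunA k x y t (c :: cs)
        = (x'.getD t 0, y'.getD t 0) :: pvRunA k x' y' ((t + 1) % k) cs := by
      rw [pvRunA]
    have ht' : (t + 1) % k < k := Nat.mod_lt _ hk
    have hstride : pvStride (c :: cs) k = c :: pvStride (cs.drop (k - 1)) k := by
      rw [pvStride]
    rw [hrun, List.mem_cons, ih x' y' _ ht' hx'len hy'len]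
    constructor
    · rintro (rfl | ⟨i, hik, hmem⟩)
      · refine ⟨t, ht, ?_⟩
        rw [pv_resid_self, List.drop_zero, hstride, pvWalk, ← hq0]
        exact List.mem_cons_self
      · by_cases hit : i = t
        · subst hit
          refine ⟨i, ht, ?_⟩
          rw [pv_resid_self, List.drop_zero, hstride, pvWalk, List.mem_cons]
          right
          rw [pv_resid_self_next _ _ ht] at hmem
          rw [← hq0]
          exact hmem
        · obtain ⟨h1, h2⟩ := pv_resid_ne i t k hik ht hit
          obtain ⟨hgx, hgy⟩ := hgne i hit
          refine ⟨i, hik, ?_⟩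
          rw [hgx, hgy, h2] at hmem
          have hdrop : (c :: cs).drop (pvResid i t k) = cs.drop (pvResid i t k - 1) := by
            obtain ⟨m, hm⟩ : ∃ m, pvResid i t k = m + 1 := ⟨pvResid i t k - 1, by omega⟩
            rw [hm]
            simp
          rw [hdrop]
          exact hmem
    · rintro ⟨i, hik, hmem⟩
      by_cases hit : i = t
      · subst hit
        rw [pv_resid_self, List.drop_zero, hstride, pvWalk, List.mem_cons] at hmem
        rcases hmem with rfl | hmem
        · left; rw [hq0]
        · right
          refine ⟨i, ht, ?_⟩
          rw [pv_resid_self_next _ _ ht, hq0]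
          exact hmem
      · obtain ⟨h1, h2⟩ := pv_resid_ne i t k hik ht hit
        obtain ⟨hgx, hgy⟩ := hgne i hit
        right
        refine ⟨i, hik, ?_⟩
        rw [hgx, hgy, h2]
        have hdrop : (c :: cs).drop (pvResid i t k) = cs.drop (pvResid i t k - 1) := by
          obtain ⟨m, hm⟩ : ∃ m, pvResid i t k = m + 1 := ⟨pvResid i t k - 1, by omega⟩
          rw [hm]
          simp
        rw [← hdrop]
        exact hmem

-- B's inner fold only ever extends the answer set with the walk's points
theorem pv_bridgeB (cs : List Char) (x y : Int) (ans : PySem.Set (Int × Int)) :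
    (cs.foldl solveAltStep (x, y, ans)).2.2
      = (pvWalk (x, y) cs).foldl PySem.Set.add ans := by
  induction cs generalizing x y ans with
  | nil => simp [pvWalk]
  | cons c cs ih =>
    have hp : ((if c = '<' then ((x : Int) - 1, (y : Int))
        else if c = '>' then (x + 1, y)
        else if c = 'v' then (x, y + 1)
        else if c = '^' then (x, y - 1)
        else (x, y)) : Int × Int) = pvMove (x, y) c := by
      simp [pvMove]
    simp only [List.foldl_cons, solveAltStep, pvWalk, hp]
    rw [ih]

theorem pv_mem_foldl_add (ws : List (Int × Int)) (s : PySem.Set (Int × Int)) (q : Int × Int) :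
    q ∈ ws.foldl PySem.Set.add s ↔ q ∈ s ∨ q ∈ ws := by
  induction ws generalizing s with
  | nil => simp
  | cons w ws ih => simp [List.foldl_cons, ih, PySem.Set.mem_add]; tauto

theorem pv_nodup_foldl_add (ws : List (Int × Int)) (s : PySem.Set (Int × Int))
    (hs : s.Nodup) : (ws.foldl PySem.Set.add s).Nodup := by
  induction ws generalizing s with
  | nil => exact hs
  | cons w ws ih => exact ih _ (PySem.Set.nodup_add _ _ hs)

-- the stride list, element by element
theorem pv_stride_getElem? (k : Nat) (hk : 0 < k) (j : Nat) (cs : List Char) :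
    (pvStride cs k)[j]? = cs[j * k]? := by
  induction j generalizing cs with
  | zero => cases cs <;> simp [pvStride]
  | succ j ih =>
    cases cs with
    | nil => simp [pvStride]
    | cons c rest =>
      rw [pvStride]
      have hidx : (j + 1) * k = (k - 1 + j * k) + 1 := by
        have h2 : (j + 1) * k = j * k + k := by ring
        rw [h2]
        omega
      rw [hidx, List.getElem?_cons_succ, List.getElem?_cons_succ, ih, List.getElem?_drop]

-- a filterMap over range whose entries are all present is a map
theorem pv_filterMap_range (g : Nat → Option Char) (cnt : Nat)
    (h : ∀ k < cnt, (g k).isSome) :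
    (List.range cnt).filterMap g = (List.range cnt).map (fun k => (g k).getD default) := by
  induction cnt with
  | zero => simp
  | succ m ih =>
    rw [List.range_succ, List.filterMap_append, List.map_append,
      ih (fun k hk => h k (Nat.lt_succ_of_lt hk))]
    obtain ⟨a, ha⟩ := Option.isSome_iff_exists.mp (h m (Nat.lt_succ_self m))
    simp [ha]

-- data[i::n] is exactly the stride starting at i
theorem pv_slice_stride (xs : List Char) (i n : Int) (hi : 0 ≤ i) (hn : 0 < n) :
    (PySem.List.slice? xs (some i) none n).getD [] = pvStride (xs.drop i.toNat) n.toNat := by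
  simp only [PySem.List.slice?, PySem.List.sliceIndices, if_neg hn.ne',
    if_neg (not_lt.mpr hn.le), if_neg (not_lt.mpr hi), if_pos hn, Option.getD_some]
  rcases Int.lt_or_le i (xs.length : Int) with hlt | hle
  case _ =>
    have hmin : min i (xs.length : Int) = i := min_eq_left hlt.le
    rw [hmin, if_pos hlt]
    set iN := i.toNat with hiN
    set nN := n.toNat with hnN
    have hiC : (iN : Int) = i := Int.toNat_of_nonneg hi
    have hnC : (nN : Int) = n := Int.toNat_of_nonneg hn.le
    have hnN0 : 0 < nN := by omega
    have hilen : iN < xs.length := by omega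
    have hcnt : (((xs.length : Int) - i + n - 1) / n).toNat
        = (xs.length - iN + nN - 1) / nN := by
      have h1 : ((xs.length : Int) - i + n - 1) = ((xs.length - iN + nN - 1 : Nat) : Int) := by
        push_cast [← hiC, ← hnC]
        omega
      rw [h1, ← hnC, ← Int.natCast_ediv]
      exact Int.toNat_natCast _
    rw [hcnt]
    set cnt := (xs.length - iN + nN - 1) / nN with hcntdef
    have hkey : ∀ j : Nat, j < cnt ↔ iN + j * nN < xs.length := by
      intro j
      have h1 : j < cnt ↔ j + 1 ≤ cnt := Iff.rfl
      rw [h1, hcntdef, Nat.le_div_iff_mul_le hnN0]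
      have h2 : (j + 1) * nN = j * nN + nN := by ring
      rw [h2]
      generalize j * nN = m
      omega
    have hidxeq : ∀ j : Nat, (i + n * (j : Int)).toNat = iN + j * nN := by
      intro j
      have h3 : i + n * (j : Int) = ((iN + j * nN : Nat) : Int) := by
        push_cast [← hiC, ← hnC]; ring
      rw [h3, Int.toNat_natCast]
    have hsome : ∀ k < cnt, (xs[(i + n * (k : Int)).toNat]?).isSome := by
      intro k hk
      rw [hidxeq k, List.getElem?_eq_getElem ((hkey k).mp hk)]
      simp
    rw [pv_filterMap_range _ _ hsome]
    apply List.ext_getElem?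
    intro j
    rw [pv_stride_getElem? nN hnN0, List.getElem?_drop, List.getElem?_map]
    by_cases hj : j < cnt
    · rw [List.getElem?_range hj, Option.map_some]
      rw [hidxeq j, List.getElem?_eq_getElem ((hkey j).mp hj)]
      rfl
    · rw [List.getElem?_eq_none (by simpa using hj), List.getElem?_eq_none]
      · rfl
      · have := (hkey j).not.mp hj
        omega
  case _ =>
    rw [min_eq_right hle, if_neg (lt_irrefl _), List.range_zero, List.filterMap_nil]
    have : xs.length ≤ i.toNat := by omega
    rw [List.drop_eq_nil_of_le this, pvStride]

-- membership and Nodup through B's outer loop of per-santa walk folds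
theorem pv_mem_foldl_walks (l : List Int) (g : Int → List (Int × Int))
    (s : PySem.Set (Int × Int)) (q : Int × Int) :
    q ∈ l.foldl (fun s i => (g i).foldl PySem.Set.add s) s ↔ q ∈ s ∨ ∃ i ∈ l, q ∈ g i := by
  induction l generalizing s with
  | nil => simp
  | cons a l ih => simp [List.foldl_cons, ih, pv_mem_foldl_add]; tauto

theorem pv_nodup_foldl_walks (l : List Int) (g : Int → List (Int × Int))
    (s : PySem.Set (Int × Int)) (hs : s.Nodup) :
    (l.foldl (fun s i => (g i).foldl PySem.Set.add s) s).Nodup := by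
  induction l generalizing s with
  | nil => exact hs
  | cons a l ih => exact ih _ (pv_nodup_foldl_add _ _ hs)

-- ===== VERDICT (by name: the statement is the Claim_ definition above) =====
theorem solve_spec : Claim_equal_solve := by
  intro data n _ hpre
  unfold Spec_solve
  by_cases hn : 1 ≤ n
  case pos =>
    set k := n.toNat with hkdef
    have hk : 0 < k := by omega
    have hnk : ((k : Nat) : Int) = n := by omega
    have hseed : (PySem.Set.ofList [((0 : Int), (0 : Int))]).Nodup :=
      PySem.Set.nodup_ofList _
    -- A's value is the length of the seed set extended with its trace
    have hA : solve data n = (((pvRunA k (List.replicate k 0) (List.replicate k 0) 0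
        data.toList).foldl PySem.Set.add
          (PySem.Set.ofList [((0 : Int), (0 : Int))])).length : Int) := by
      have hbridge := pv_bridgeA data.toList (List.replicate k 0) (List.replicate k 0)
        (PySem.Set.ofList [((0 : Int), (0 : Int))]) 0 k hk hk
      rw [hnk] at hbridge
      norm_num at hbridge
      unfold solve PySem.Set.len
      rw [← hkdef, ← hbridge]
    -- B's value likewise, a fold of the per-santa walks
    have hB : solve_alt data n = (((PySem.List.pyRange 0 n 1).foldl
        (fun s i => (pvWalk (0, 0)
          ((PySem.List.slice? data.toList (some i) none n).getD [])).foldl PySem.Set.add s)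
        (PySem.Set.ofList [((0 : Int), (0 : Int))])).length : Int) := by
      have hfun : (fun (ans : PySem.Set (Int × Int)) (i : Int) =>
          (List.foldl solveAltStep (0, 0, ans)
            ((PySem.List.slice? data.toList (some i) none n).getD [])).2.2)
          = fun s i => (pvWalk (0, 0)
            ((PySem.List.slice? data.toList (some i) none n).getD [])).foldl
              PySem.Set.add s :=
        funext fun ans => funext fun i => pv_bridgeB _ 0 0 ans
      show ((List.foldl (fun (ans : PySem.Set (Int × Int)) (i : Int) =>
          (List.foldl solveAltStep (0, 0, ans)
            ((PySem.List.slice? data.toList (some i) none n).getD [])).2.2)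
          (PySem.Set.ofList [((0 : Int), (0 : Int))])
          (PySem.List.pyRange 0 n 1)).length : Int) = _
      rw [hfun]
    -- both sets have the same members: seed plus some santa's walk
    have hmemA : ∀ q, q ∈ (pvRunA k (List.replicate k 0) (List.replicate k 0) 0
        data.toList).foldl PySem.Set.add (PySem.Set.ofList [((0 : Int), (0 : Int))]) ↔
        q = (0, 0) ∨ ∃ i, i < k ∧ q ∈ pvWalk (0, 0) (pvStride (data.toList.drop i) k) := by
      intro q
      rw [pv_mem_foldl_add,
        pv_mem_runA data.toList k _ _ 0 hk hk (by simp) (by simp)]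
      have hz : ∀ (P : Prop) [Decidable P], ((if P then some (0 : Int) else none).getD 0) = 0 := by
        intro P _; split_ifs <;> rfl
      simp [PySem.Set.mem_ofList, pvResid, List.getD_eq_getElem?_getD,
        List.getElem?_replicate, hz]
    have hmemB : ∀ q, q ∈ (PySem.List.pyRange 0 n 1).foldl
        (fun s i => (pvWalk (0, 0)
          ((PySem.List.slice? data.toList (some i) none n).getD [])).foldl PySem.Set.add s)
        (PySem.Set.ofList [((0 : Int), (0 : Int))]) ↔
        q = (0, 0) ∨ ∃ i, i < k ∧ q ∈ pvWalk (0, 0) (pvStride (data.toList.drop i) k) := by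
      intro q
      rw [pv_mem_foldl_walks]
      simp only [PySem.Set.mem_ofList, List.mem_singleton]
      apply or_congr Iff.rfl
      constructor
      · rintro ⟨i, hi, hq⟩
        obtain ⟨hi0, hin⟩ := (PySem.List.mem_pyRange_one).mp hi
        rw [pv_slice_stride _ _ _ hi0 (by omega)] at hq
        exact ⟨i.toNat, by omega, hq⟩
      · rintro ⟨iN, hiN, hq⟩
        refine ⟨(iN : Int), (PySem.List.mem_pyRange_one).mpr ⟨by omega, by omega⟩, ?_⟩
        rw [pv_slice_stride _ _ _ (by omega) (by omega)]
        simpa [Int.toNat_natCast] using hq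
    have hndA := pv_nodup_foldl_add (pvRunA k (List.replicate k 0) (List.replicate k 0) 0
      data.toList) _ hseed
    have hndB := pv_nodup_foldl_walks (PySem.List.pyRange 0 n 1)
      (fun i => pvWalk (0, 0) ((PySem.List.slice? data.toList (some i) none n).getD []))
      _ hseed
    have hperm := (List.perm_ext_iff_of_nodup hndA hndB).mpr
      (fun q => (hmemA q).trans (hmemB q).symm)
    rw [hA, hB, hperm.length_eq]
  case neg =>
    have hd : data = "" := hpre.resolve_left hn
    subst hd
    have hr : PySem.List.pyRange 0 n 1 = [] := PySem.List.pyRange_one_eq_nil (by omega)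
    unfold solve solve_alt
    rw [hr]
    rfl
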